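-- pv_equiv track=rewrite | github.com/sjdv1982/attract | spydersilk-0.03/spyder/qtform/xml.py | indent_xml
-- ===== SOURCE A (Python) =====
-- def indent_xml(lines):
--   ret = []
--   indent = 0
--   for lnr, l in enumerate(lines):
--     l = l.lstrip()
--     pos = 0
--     while 1:
--       newpos = l.find("<", pos)
--       if newpos != 0: break
--       ch = l[newpos+1]
--       if ch == "/":
--         indent -= 1
--       break
--
--     cindent = max(indent, 0)
--     ret.append(cindent * " " + l)
--
--     pos = 0
--     while 1:
--       newpos = l.find("<", pos)
--       if newpos == -1: break
--       ch = l[newpos+1]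
--       if ch == "/":
--         if newpos == 0: pass
--         else: indent -= 1
--       elif ch in ("?", "!"): pass
--       else: indent += 1
--       pos = newpos+1
--
--   return ret
-- ===== SOURCE B (Python) =====
-- def indent_xml(lines):
--   ret = []
--   indent = 0
--   for l in lines:
--     l = l.lstrip()
--     nxt = [l[i + 1] for i, ch in enumerate(l) if ch == "<"]
--     lead = 1 if l.startswith("</") else 0
--     indent -= lead
--     ret.append(max(indent, 0) * " " + l)
--     opens = sum(1 for ch in nxt if ch not in "/?!")
--     indent += opens - (nxt.count("/") - lead)
--   return ret
-- ===== Notes on version B (the rewrite author's own statement) =====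
-- stated objective: simpler
-- what changed: A drives two stateful while-loops with str.find over each line; B builds the list of characters following each '<' in one comprehension, derives the leading-'</' flag from startswith, and updates the indent by count arithmetic (opens minus closers) instead of per-match branching.
import Mathlib
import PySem

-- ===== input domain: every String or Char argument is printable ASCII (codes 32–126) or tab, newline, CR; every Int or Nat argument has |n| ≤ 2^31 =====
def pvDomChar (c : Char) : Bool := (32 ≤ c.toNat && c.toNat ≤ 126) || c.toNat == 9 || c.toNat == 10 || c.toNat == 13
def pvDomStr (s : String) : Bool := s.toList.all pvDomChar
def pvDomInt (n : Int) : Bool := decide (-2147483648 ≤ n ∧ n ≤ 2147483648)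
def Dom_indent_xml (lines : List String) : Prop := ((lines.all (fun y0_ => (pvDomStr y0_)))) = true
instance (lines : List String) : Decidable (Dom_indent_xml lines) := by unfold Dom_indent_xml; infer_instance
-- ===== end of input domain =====

-- B replaces A's two stateful find-scans per line by one marker pass plus count arithmetic
-- (objective: simpler). Equivalence is about the return value; neither program mutates its input.

-- ===== PORT A =====
-- A's second while-loop: pos advances to newpos+1 each iteration; fuel = l.length + 1 bounds
-- the number of iterations (newpos strictly increases and is < l.length), so the fuel is never
-- exhausted — it only makes the recursion structural.
-- 'ch = l[newpos+1]' raises IndexError when out of range (PySem.List.pyGet? = none); Pre_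
-- excludes those inputs, so the '.getD ' '' default is never claimed.
def indentScanA (l : List Char) : Nat → Nat → Int → Int
  | 0, _, indent => indent
  | fuel + 1, pos, indent =>
    let newpos := PySem.Chars.findFrom l ['<'] (pos : Int) none
    if newpos = -1 then indent
    else
      let ch := (PySem.List.pyGet? l (newpos + 1)).getD ' '
      let indent' :=
        if ch = '/' then (if newpos = 0 then indent else indent - 1)
        else if ch = '?' ∨ ch = '!' then indent
        else indent + 1
      indentScanA l fuel (newpos.toNat + 1) indent'

def indent_xml (lines : List String) : List String :=
  (lines.foldl (fun (st : List String × Int) l0 =>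
    let l := PySem.Chars.lstrip l0.toList
    -- first while-loop: it breaks in every branch, so it runs its body at most once
    let newpos := PySem.Chars.findFrom l ['<'] ((0 : Nat) : Int) none
    let indent :=
      if newpos ≠ 0 then st.2
      else if (PySem.List.pyGet? l (newpos + 1)).getD ' ' = '/' then st.2 - 1 else st.2
    let ret := st.1 ++ [String.mk (List.replicate (max indent 0).toNat ' ' ++ l)]
    (ret, indentScanA l (l.length + 1) 0 indent)) ([], 0)).1

-- ===== PORT B =====
def indent_xml_alt (lines : List String) : List String :=
  (lines.foldl (fun (st : List String × Int) l0 =>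
    let l := PySem.Chars.lstrip l0.toList
    -- nxt = [l[i+1] for i, ch in enumerate(l) if ch == "<"]  (l[i+1] raises when out of range)
    let nxt := (PySem.List.enumerate l).filterMap
      (fun p => if p.2 = '<' then some ((PySem.List.pyGet? l (p.1 + 1)).getD ' ') else none)
    let lead : Int := if PySem.Chars.startswith l ['<', '/'] then 1 else 0
    let indent := st.2 - lead
    let ret := st.1 ++ [String.mk (List.replicate (max indent 0).toNat ' ' ++ l)]
    let opens : Int := nxt.countP (fun c => !(c == '/' || c == '?' || c == '!'))
    (ret, indent + opens - ((nxt.count '/' : Int) - lead))) ([], 0)).1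

-- ===== PRECONDITION & SPEC =====
-- Pre_ excludes exactly the inputs on which the Python A raises IndexError: a line whose
-- lstripped form ends in '<' makes A evaluate l[newpos+1] one past the end.
def Pre_indent_xml (lines : List String) : Prop :=
  ∀ s ∈ lines, (PySem.Chars.lstrip s.toList).getLast? ≠ some '<'
instance (lines : List String) : Decidable (Pre_indent_xml lines) := by
  unfold Pre_indent_xml; infer_instance
def pvWitness_indent_xml : List String := ["<a>", " <b/>", "<?x?>", "</a>"]

def Spec_indent_xml (lines : List String) (out : List String) : Prop := out = indent_xml_alt lines
instance (lines : List String) (out : List String) : Decidable (Spec_indent_xml lines out) := by unfold Spec_indent_xml; infer_instance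

-- ===== CLAIM (what is proved, stated in full; the proofs are below) =====
def Claim_equal_indent_xml : Prop := ∀ (lines : List String), Dom_indent_xml lines → Pre_indent_xml lines → Spec_indent_xml lines (indent_xml lines)

-- ===== LEMMAS AND PROOFS =====

-- the list of characters following each '<' of l, by structural recursion
def nxtR : List Char → List Char
  | [] => []
  | c :: rest => (if c = '<' then [rest.headD ' '] else []) ++ nxtR rest

-- character-by-character reading of A's second loop ('atZero' = the current position is 0)
def walk : List Char → Bool → Int → Int
  | [], _, ind => ind
  | c :: rest, atZero, ind =>
    if c = '<' then
      walk rest false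
        (if rest.headD ' ' = '/' then (if atZero then ind else ind - 1)
         else if rest.headD ' ' = '?' ∨ rest.headD ' ' = '!' then ind else ind + 1)
    else walk rest false ind

def pOpen : Char → Bool := fun c => !(c == '/' || c == '?' || c == '!')

lemma singleton_prefix_iff (a : Char) (s : List Char) : [a] <+: s ↔ s.head? = some a := by
  cases s with
  | nil => simp
  | cons c t => simp [List.cons_prefix_cons, eq_comm]

lemma headD_drop (l : List Char) (m : Nat) : (l.drop m).headD ' ' = l[m]?.getD ' ' := by
  simp [List.headD_eq_head?_getD, List.head?_eq_getElem?, List.getElem?_drop]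

lemma nxt_eq_nxtR (l : List Char) :
    ∀ (t : List Char) (k : Nat), t = l.drop k →
    (PySem.List.enumerate t k).filterMap
      (fun p => if p.2 = '<' then some ((PySem.List.pyGet? l (p.1 + 1)).getD ' ') else none)
      = nxtR t := by
  intro t
  induction t with
  | nil => intro k _; simp [PySem.List.enumerate_nil, nxtR]
  | cons c rest ih =>
    intro k hk
    have hrest : rest = l.drop (k + 1) := by
      have := congrArg List.tail hk
      simpa [List.tail_drop] using this
    have hget : (PySem.List.pyGet? l ((k : Int) + 1)).getD ' ' = rest.head?.getD ' ' := by
      rw [show ((k : Int) + 1) = ((k + 1 : Nat) : Int) from by push_cast; ring,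
        PySem.List.pyGet?_natCast, hrest, List.head?_eq_getElem?, List.getElem?_drop,
        Nat.add_zero]
    rw [PySem.List.enumerate_cons, List.filterMap_cons,
      show PySem.List.enumerate rest ((k : Int) + 1)
        = PySem.List.enumerate rest ((k + 1 : Nat) : Int) from by push_cast; ring_nf,
      ih (k + 1) hrest]
    by_cases hc : c = '<'
    · simp [nxtR, hc, hget, List.headD_eq_head?_getD]
    · simp [nxtR, hc]

lemma walk_no_lt (cs : List Char) (b : Bool) (ind : Int) (h : '<' ∉ cs) :
    walk cs b ind = ind := by
  induction cs generalizing b with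
  | nil => rfl
  | cons c rest ih =>
    have hc : c ≠ '<' := fun e => h (e ▸ List.mem_cons_self)
    rw [walk, if_neg hc]
    exact ih _ (fun hm => h (List.mem_cons_of_mem _ hm))

lemma walk_skip (mid rest : List Char) (b : Bool) (ind : Int) (h : '<' ∉ mid) :
    walk (mid ++ rest) b ind = walk rest (b && mid.isEmpty) ind := by
  induction mid generalizing b with
  | nil => simp
  | cons c t ih =>
    have hc : c ≠ '<' := fun e => h (e ▸ List.mem_cons_self)
    rw [List.cons_append, walk, if_neg hc, ih false (fun hm => h (List.mem_cons_of_mem _ hm))]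
    simp

-- the net indent change contributed by a list of after-'<' characters
def dP (xs : List Char) : Int := (xs.countP pOpen : Int) - (xs.count '/' : Int)

def stepv (ch : Char) : Int := if ch = '/' then -1 else if ch = '?' ∨ ch = '!' then 0 else 1

lemma dP_cons (ch : Char) (t : List Char) : dP (ch :: t) = dP t + stepv ch := by
  unfold dP stepv
  by_cases h1 : ch = '/'
  · have hp : pOpen ch = false := by simp [pOpen, h1]
    simp [List.countP_cons, List.count_cons, hp, h1]
    push_cast; ring
  · have hne : (ch == '/') = false := by simp [h1]
    by_cases h2 : ch = '?' ∨ ch = '!'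
    · have hp : pOpen ch = false := by rcases h2 with h2 | h2 <;> simp [pOpen, h2]
      simp [List.countP_cons, List.count_cons, hp, hne, h1, h2]
    · have hp : pOpen ch = true := by
        simp only [pOpen, Bool.not_eq_true']
        push_neg at h2
        simp [h1, h2.1, h2.2]
      simp [List.countP_cons, List.count_cons, hp, hne, h1, h2]
      push_cast; ring

lemma nxtR_cons_lt (rest : List Char) : nxtR ('<' :: rest) = rest.headD ' ' :: nxtR rest := by
  simp [nxtR]

lemma nxtR_cons_ne (c : Char) (rest : List Char) (hc : c ≠ '<') :
    nxtR (c :: rest) = nxtR rest := by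
  simp [nxtR, hc]

lemma walk_false (cs : List Char) (ind : Int) :
    walk cs false ind = ind + dP (nxtR cs) := by
  induction cs generalizing ind with
  | nil => simp [walk, nxtR, dP]
  | cons c rest ih =>
    by_cases hc : c = '<'
    · subst hc
      rw [walk, if_pos rfl, ih, nxtR_cons_lt, dP_cons, stepv]
      simp only [Bool.false_eq_true, if_false]
      by_cases h1 : rest.headD ' ' = '/'
      · rw [if_pos h1, if_pos h1]; ring
      · rw [if_neg h1, if_neg h1]
        by_cases h2 : rest.headD ' ' = '?' ∨ rest.headD ' ' = '!'
        · rw [if_pos h2, if_pos h2]; ring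
        · rw [if_neg h2, if_neg h2]; ring
    · rw [walk, if_neg hc, ih, nxtR_cons_ne c rest hc]

lemma startswith_cons_iff (c : Char) (rest : List Char) :
    PySem.Chars.startswith (c :: rest) ['<', '/'] = true ↔ (c = '<' ∧ rest.head? = some '/') := by
  rw [PySem.Chars.startswith_iff]
  cases rest with
  | nil => simp [List.cons_prefix_cons]
  | cons a t =>
    simp only [List.cons_prefix_cons, List.head?_cons, Option.some.injEq]
    constructor
    · rintro ⟨h1, h2, -⟩; exact ⟨h1.symm, h2.symm⟩
    · rintro ⟨h1, h2⟩; exact ⟨h1.symm, h2.symm, List.nil_prefix⟩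

def leadI (l : List Char) : Int := if PySem.Chars.startswith l ['<', '/'] then 1 else 0

lemma startswith_of_headD (c : Char) (rest : List Char) (hc : c = '<')
    (h1 : rest.headD ' ' = '/') : PySem.Chars.startswith (c :: rest) ['<', '/'] = true := by
  refine (startswith_cons_iff c rest).mpr ⟨hc, ?_⟩
  cases rest with
  | nil => simp at h1
  | cons a t => simpa using h1

lemma not_startswith_of_headD (c : Char) (rest : List Char)
    (h1 : ¬ (c = '<' ∧ rest.headD ' ' = '/')) :
    PySem.Chars.startswith (c :: rest) ['<', '/'] = false := by
  rw [Bool.eq_false_iff]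
  intro htrue
  rcases (startswith_cons_iff c rest).mp htrue with ⟨hc, hhd⟩
  refine h1 ⟨hc, ?_⟩
  cases rest with
  | nil => simp at hhd
  | cons a t => simp at hhd; simp [hhd]

lemma walk_true (l : List Char) (ind : Int) :
    walk l true ind = ind + dP (nxtR l) + leadI l := by
  cases l with
  | nil =>
    have hs : PySem.Chars.startswith ([] : List Char) ['<', '/'] = false := by decide
    simp [walk, nxtR, dP, leadI, hs]
  | cons c rest =>
    by_cases hc : c = '<'
    · subst hc
      rw [walk, if_pos rfl, walk_false, nxtR_cons_lt, dP_cons, stepv]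
      by_cases h1 : rest.headD ' ' = '/'
      · rw [if_pos h1, if_pos h1, if_pos rfl,
          leadI, startswith_of_headD '<' rest rfl h1, if_pos rfl]
        ring
      · rw [if_neg h1, if_neg h1, leadI,
          not_startswith_of_headD '<' rest (by intro h; exact h1 h.2)]
        simp only [Bool.false_eq_true, if_false]
        by_cases h2 : rest.headD ' ' = '?' ∨ rest.headD ' ' = '!'
        · rw [if_pos h2, if_pos h2]; ring
        · rw [if_neg h2, if_neg h2]; ring
    · rw [walk, if_neg hc, walk_false, nxtR_cons_ne c rest hc, leadI,
        not_startswith_of_headD c rest (by intro h; exact hc h.1)]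
      simp only [Bool.false_eq_true, if_false]
      ring

lemma drop_head_lt (l : List Char) (m : Nat) (h : ['<'] <+: l.drop m) :
    m < l.length ∧ l.drop m = '<' :: l.drop (m + 1) := by
  have hh : (l.drop m).head? = some '<' := (singleton_prefix_iff _ _).mp h
  have hne : l.drop m ≠ [] := by intro e; rw [e] at hh; simp at hh
  have hm : m < l.length := by
    by_contra hge
    exact hne (List.drop_eq_nil_iff.mpr (by omega))
  refine ⟨hm, ?_⟩
  have hcons : l.drop m = ((l.drop m).head?).getD ' ' :: (l.drop m).tail := by
    cases h' : l.drop m with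
    | nil => exact absurd h' hne
    | cons a t => rw [h'] at hh; simp at hh; simp [hh]
  rw [hcons, hh, List.tail_drop]
  rfl

lemma prefix_lt_of_getElem (l : List Char) (i : Nat) (hi : i < l.length) (h : l[i] = '<') :
    ['<'] <+: l.drop i := by
  rw [singleton_prefix_iff, List.head?_eq_getElem?, List.getElem?_drop]
  rw [List.getElem?_eq_getElem (by omega : i + 0 < l.length)]
  simp [h]

lemma scanA_eq_walk (l : List Char) :
    ∀ (fuel k : Nat) (ind : Int), k ≤ l.length → l.length - k < fuel →
    indentScanA l fuel k ind = walk (l.drop k) (decide (k = 0)) ind := by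
  intro fuel
  induction fuel with
  | zero => intro k ind _ h; omega
  | succ fuel ih =>
    intro k ind hk hfuel
    rw [indentScanA]
    simp only
    by_cases hnp : PySem.Chars.findFrom l ['<'] (k : Int) none = -1
    · rw [if_pos hnp]
      have hnin : ¬ ['<'] <:+: l.drop k :=
        (PySem.Chars.findFrom_natCast_eq_neg_one_iff l ['<'] k hk).mp hnp
      have hmem : '<' ∉ l.drop k := fun hm => hnin ((List.singleton_infix_iff _ _).mpr hm)
      rw [walk_no_lt _ _ _ hmem]
    · rw [if_neg hnp]
      obtain ⟨hge, hpre, hmin⟩ := PySem.Chars.findFrom_natCast_spec l ['<'] k hk hnp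
      set np := PySem.Chars.findFrom l ['<'] (k : Int) none with hnpdef
      have hnp0 : (0 : Int) ≤ np := le_trans (Int.natCast_nonneg k) hge
      obtain ⟨hlt, hdrop⟩ := drop_head_lt l np.toNat hpre
      have hkle : k ≤ np.toNat := by omega
      -- the segment between k and np contains no '<'
      have hmid : '<' ∉ (l.drop k).take (np.toNat - k) := by
        intro hm
        obtain ⟨j, hj, hje⟩ := List.getElem_of_mem hm
        have hjlt : j < np.toNat - k := by
          have h2 := hj
          simp only [List.length_take, List.length_drop] at h2
          omega
        have hkj : k + j < l.length := by omega
        have hval : l[k + j] = '<' := by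
          have h3 : ((l.drop k).take (np.toNat - k))[j] = l[k + j] := by
            rw [List.getElem_take, List.getElem_drop]
          rw [← h3, hje]
        exact hmin (k + j) (by omega) (by omega)
          (prefix_lt_of_getElem l (k + j) hkj hval)
      have hsplit : l.drop k = (l.drop k).take (np.toNat - k) ++ l.drop np.toNat := by
        have h2 : l.drop np.toNat = List.drop (np.toNat - k) (l.drop k) := by
          rw [List.drop_drop]
          congr 1
          omega
        rw [h2, List.take_append_drop]
      have hflag : (decide (k = 0) && ((l.drop k).take (np.toNat - k)).isEmpty)
          = decide (np.toNat = 0) := by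
        have hlen : ((l.drop k).take (np.toNat - k)).length = np.toNat - k := by
          simp only [List.length_take, List.length_drop]
          omega
        by_cases hz : np.toNat = 0
        · have hk0 : k = 0 := by omega
          have he : ((l.drop k).take (np.toNat - k)).isEmpty = true := by
            rw [List.isEmpty_iff_length_eq_zero, hlen]; omega
          simp [hk0, hz, he]
        · by_cases hk0 : k = 0
          · have he : ((l.drop k).take (np.toNat - k)).isEmpty = false := by
              rw [Bool.eq_false_iff, ne_eq, List.isEmpty_iff_length_eq_zero, hlen]; omega
            simp [hk0, hz, he]
            intro h0
            rw [h0] at hlt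
            simp at hlt
          · simp [hk0, hz]
      have hchEq : (l.drop (np.toNat + 1)).headD ' ' = (PySem.List.pyGet? l (np + 1)).getD ' ' := by
        have h1 : np + 1 = ((np.toNat + 1 : Nat) : Int) := by omega
        rw [headD_drop, h1, PySem.List.pyGet?_natCast]
      have hrec : ∀ x : Int, indentScanA l fuel (np.toNat + 1) x
          = walk (l.drop (np.toNat + 1)) false x := by
        intro x
        have h2 := ih (np.toNat + 1) x (by omega) (by omega)
        simpa using h2
      rw [hsplit, walk_skip _ _ _ _ hmid, hflag, hdrop, walk, if_pos rfl, hchEq, hrec]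
      by_cases hz : np = 0
      · have hz' : np.toNat = 0 := by omega
        simp [hz, hz']
      · have hz' : np.toNat ≠ 0 := by omega
        simp [hz, hz']

-- A's first loop computes st.2 minus the leading-'</' flag
lemma firstloop_eq (l : List Char) (ind : Int) :
    (if PySem.Chars.findFrom l ['<'] ((0 : Nat) : Int) none ≠ 0 then ind
     else if (PySem.List.pyGet? l (PySem.Chars.findFrom l ['<'] ((0 : Nat) : Int) none + 1)).getD ' ' = '/'
       then ind - 1 else ind)
    = ind - leadI l := by
  rw [show ((0 : Nat) : Int) = (0 : Int) from rfl, PySem.Chars.findFrom_zero]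
  cases l with
  | nil =>
    have h1 : PySem.Chars.find [] ['<'] = -1 := by decide
    have hs : PySem.Chars.startswith ([] : List Char) ['<', '/'] = false := by decide
    simp [h1, leadI, hs]
  | cons c rest =>
    by_cases hc : c = '<'
    · have hfind : PySem.Chars.find (c :: rest) ['<'] = 0 := by
        have hinf : ['<'] <:+: (c :: rest) :=
          ((singleton_prefix_iff _ _).mpr (by simp [hc])).isInfix
        have hnn : 0 ≤ PySem.Chars.find (c :: rest) ['<'] :=
          (PySem.Chars.find_nonneg_iff _ _).mpr hinf
        obtain ⟨-, hmin⟩ := PySem.Chars.find_spec hnn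
        by_contra hne
        have hpos : 0 < (PySem.Chars.find (c :: rest) ['<']).toNat := by omega
        exact hmin 0 hpos ((singleton_prefix_iff _ _).mpr (by simp [hc]))
      rw [hfind]
      simp only [ne_eq, not_true_eq_false, if_false, zero_add]
      have hget : (PySem.List.pyGet? (c :: rest) 1).getD ' ' = rest.headD ' ' := by
        rw [show (1 : Int) = ((0 : Nat) : Int) + 1 from by norm_num,
          PySem.List.pyGet?_cons_succ, PySem.List.pyGet?_natCast]
        cases rest <;> simp
      rw [hget]
      by_cases h1 : rest.headD ' ' = '/'
      · rw [if_pos h1, leadI, startswith_of_headD c rest hc h1, if_pos rfl]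
      · rw [if_neg h1, leadI, not_startswith_of_headD c rest (by intro h; exact h1 h.2)]
        simp
    · have hfind : PySem.Chars.find (c :: rest) ['<'] ≠ 0 := by
        intro h0
        have hnn : 0 ≤ PySem.Chars.find (c :: rest) ['<'] := by omega
        obtain ⟨hpre, -⟩ := PySem.Chars.find_spec hnn
        rw [h0] at hpre
        simp only [Int.toNat_zero, List.drop_zero] at hpre
        have hh := (singleton_prefix_iff '<' (c :: rest)).mp hpre
        simp only [List.head?_cons, Option.some.injEq] at hh
        exact hc hh
      rw [leadI, not_startswith_of_headD c rest (by intro h; exact hc h.1)]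
      simp [hfind]

lemma step_eq (st : List String × Int) (l0 : String) :
    (let l := PySem.Chars.lstrip l0.toList
     let newpos := PySem.Chars.findFrom l ['<'] ((0 : Nat) : Int) none
     let indent :=
       if newpos ≠ 0 then st.2
       else if (PySem.List.pyGet? l (newpos + 1)).getD ' ' = '/' then st.2 - 1 else st.2
     let ret := st.1 ++ [String.mk (List.replicate (max indent 0).toNat ' ' ++ l)]
     ((ret, indentScanA l (l.length + 1) 0 indent) : List String × Int))
    = (let l := PySem.Chars.lstrip l0.toList
       let nxt := (PySem.List.enumerate l).filterMap
         (fun p => if p.2 = '<' then some ((PySem.List.pyGet? l (p.1 + 1)).getD ' ') else none)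
       let lead : Int := if PySem.Chars.startswith l ['<', '/'] then 1 else 0
       let indent := st.2 - lead
       let ret := st.1 ++ [String.mk (List.replicate (max indent 0).toNat ' ' ++ l)]
       let opens : Int := nxt.countP (fun c => !(c == '/' || c == '?' || c == '!'))
       ((ret, indent + opens - ((nxt.count '/' : Int) - lead)) : List String × Int)) := by
  simp only
  set l := PySem.Chars.lstrip l0.toList with hl
  rw [firstloop_eq l st.2]
  have hnxt : (PySem.List.enumerate l).filterMap
      (fun p => if p.2 = '<' then some ((PySem.List.pyGet? l (p.1 + 1)).getD ' ') else none)
      = nxtR l := nxt_eq_nxtR l l 0 (by simp)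
  rw [hnxt]
  have hscan : indentScanA l (l.length + 1) 0 (st.2 - leadI l)
      = walk l true (st.2 - leadI l) := by
    have := scanA_eq_walk l (l.length + 1) 0 (st.2 - leadI l) (by omega) (by omega)
    simpa using this
  rw [hscan, walk_true,
    show (fun c => !(c == '/' || c == '?' || c == '!')) = pOpen from rfl,
    show (if PySem.Chars.startswith l ['<', '/'] then (1 : Int) else 0) = leadI l from rfl]
  refine congrArg₂ Prod.mk rfl ?_
  unfold dP
  ring

lemma ports_eq (lines : List String) : indent_xml lines = indent_xml_alt lines := by
  unfold indent_xml indent_xml_alt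
  congr 1
  congr 1
  funext st l0
  exact step_eq st l0

-- ===== VERDICT (by name: the statement is the Claim_ definition above) =====
theorem indent_xml_spec : Claim_equal_indent_xml := by
  intro lines _ _
  unfold Spec_indent_xml
  exact ports_eq lines
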